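-- pv_equiv track=rewrite | github.com/ianswain2/swainos_backend | scripts/sync_salesforce_readonly.py | as_sorted_cursor
-- ===== SOURCE A (Python) =====
-- from typing import Dict, Iterable, List, Optional, Sequence, Tuple
--
-- def as_sorted_cursor(rows: Iterable[Dict[str, str]]) -> Tuple[Optional[str], Optional[str]]:
--     sortable: List[Tuple[str, str]] = []
--     for row in rows:
--         stamp = str(row.get("SystemModstamp") or "").strip()
--         record_id = str(row.get("Id") or "").strip()
--         if not stamp or not record_id:
--             continue
--         sortable.append((stamp, record_id))
--     if not sortable:
--         return None, None
--     sortable.sort()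
--     return sortable[-1]
-- ===== SOURCE B (Python) =====
-- def as_sorted_cursor(rows):
--     best = None
--     for row in rows:
--         stamp = str(row.get("SystemModstamp") or "").strip()
--         record_id = str(row.get("Id") or "").strip()
--         if not stamp or not record_id:
--             continue
--         if best is None or stamp > best[0] or (stamp == best[0] and record_id > best[1]):
--             best = (stamp, record_id)
--     if best is None:
--         return None, None
--     return best
-- ===== Notes on version B (the rewrite author's own statement) =====
-- stated objective: simpler
-- what changed: Replaces build-list-then-sort-then-take-last with a single streaming pass that keeps a running best (stamp, id) tuple via an explicit lexicographic comparison, with no intermediate list and no sort.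
import Mathlib
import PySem

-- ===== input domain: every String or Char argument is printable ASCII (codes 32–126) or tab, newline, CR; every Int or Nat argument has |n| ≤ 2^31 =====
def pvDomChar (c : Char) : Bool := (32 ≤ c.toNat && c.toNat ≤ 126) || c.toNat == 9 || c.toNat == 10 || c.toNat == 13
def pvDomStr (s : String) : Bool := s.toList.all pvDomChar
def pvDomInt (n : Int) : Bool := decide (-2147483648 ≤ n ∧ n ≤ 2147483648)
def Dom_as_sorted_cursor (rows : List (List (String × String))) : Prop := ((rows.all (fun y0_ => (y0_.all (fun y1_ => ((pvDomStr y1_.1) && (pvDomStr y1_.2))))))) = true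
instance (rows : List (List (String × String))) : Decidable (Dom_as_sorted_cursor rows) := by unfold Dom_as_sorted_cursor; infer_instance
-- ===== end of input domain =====

-- B replaces build-list + sort + take-last by one streaming pass keeping a running best tuple
-- with an explicit lexicographic comparison (no intermediate list, no sort).

-- ===== PORT A =====
-- str(row.get(k) or '') : first-match association-list lookup; a missing key or an empty value both give ""
def pvRowVal (row : List (String × String)) (k : String) : String :=
  (List.lookup k row).getD ""

def as_sorted_cursor (rows : List (List (String × String))) : Option String × Option String :=
  let sortable := rows.foldl (fun acc row =>
      let stamp := PySem.Str.strip (pvRowVal row "SystemModstamp")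
      let record_id := PySem.Str.strip (pvRowVal row "Id")
      if stamp = "" ∨ record_id = "" then acc
      else acc ++ [(stamp, record_id)]) []
  if sortable = [] then (none, none)
  else
    -- Python's tuple sort is lexicographic: key into the lexicographic order String ×ₗ String
    let s := PySem.List.sorted sortable (fun p => (toLex p : String ×ₗ String)) false
    match PySem.List.pyGet? s (-1) with
    | some (a, b) => (some a, some b)
    | none => (none, none)  -- unreachable: sortable ≠ []

-- ===== PORT B =====
def pvStep (best : Option (String × String)) (row : List (String × String)) :
    Option (String × String) :=
  let stamp := PySem.Str.strip (pvRowVal row "SystemModstamp")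
  let record_id := PySem.Str.strip (pvRowVal row "Id")
  if stamp = "" ∨ record_id = "" then best
  else
    match best with
    | none => some (stamp, record_id)
    | some b =>
      if b.1 < stamp ∨ (stamp = b.1 ∧ b.2 < record_id) then some (stamp, record_id)
      else some b

def as_sorted_cursor_alt (rows : List (List (String × String))) : Option String × Option String :=
  match rows.foldl pvStep none with
  | none => (none, none)
  | some (s, i) => (some s, some i)

-- ===== PRECONDITION & SPEC =====
def Spec_as_sorted_cursor (rows : List (List (String × String))) (out : Option String × Option String) : Prop := out = as_sorted_cursor_alt rows
instance (rows : List (List (String × String))) (out : Option String × Option String) : Decidable (Spec_as_sorted_cursor rows out) := by unfold Spec_as_sorted_cursor; infer_instance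

-- ===== CLAIM (what is proved, stated in full; the proofs are below) =====
def Claim_equal_as_sorted_cursor : Prop := ∀ (rows : List (List (String × String))), Dom_as_sorted_cursor rows → Spec_as_sorted_cursor rows (as_sorted_cursor rows)

-- ===== LEMMAS AND PROOFS =====

/-- The pair a row contributes (`none` = filtered out by the empty-string guard). -/
def pvExtract (row : List (String × String)) : Option (String × String) :=
  let stamp := PySem.Str.strip (pvRowVal row "SystemModstamp")
  let record_id := PySem.Str.strip (pvRowVal row "Id")
  if stamp = "" ∨ record_id = "" then none else some (stamp, record_id)

/-- The running-max update on the filtered pairs. -/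
def pvUpd (best : Option (String × String)) (p : String × String) : Option (String × String) :=
  match best with
  | none => some p
  | some b => if b.1 < p.1 ∨ (p.1 = b.1 ∧ b.2 < p.2) then some p else some b

theorem pvA_fold_eq (rows : List (List (String × String)))
    (acc : List (String × String)) :
    rows.foldl (fun acc row =>
      let stamp := PySem.Str.strip (pvRowVal row "SystemModstamp")
      let record_id := PySem.Str.strip (pvRowVal row "Id")
      if stamp = "" ∨ record_id = "" then acc
      else acc ++ [(stamp, record_id)]) acc
    = acc ++ rows.filterMap pvExtract := by
  induction rows generalizing acc with
  | nil => simp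
  | cons r t ih =>
    simp only [List.foldl_cons, List.filterMap_cons, pvExtract]
    split_ifs with h <;> simp [ih] <;> rfl

theorem pvStep_eq (best : Option (String × String)) (row : List (String × String)) :
    pvStep best row = match pvExtract row with
      | none => best
      | some p => pvUpd best p := by
  cases best <;>
  · simp only [pvStep, pvExtract]
    by_cases h : PySem.Str.strip (pvRowVal row "SystemModstamp") = "" ∨
        PySem.Str.strip (pvRowVal row "Id") = "" <;>
      simp [pvUpd, h]

theorem pvB_fold_eq (rows : List (List (String × String)))
    (best : Option (String × String)) :
    rows.foldl pvStep best = (rows.filterMap pvExtract).foldl pvUpd best := by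
  induction rows generalizing best with
  | nil => rfl
  | cons r t ih =>
    simp only [List.foldl_cons, List.filterMap_cons, pvStep_eq]
    cases pvExtract r <;> simp [ih]

theorem pvUpd_lt_iff (b p : String × String) :
    (b.1 < p.1 ∨ (p.1 = b.1 ∧ b.2 < p.2)) ↔ toLex b < toLex p := by
  rw [Prod.Lex.lt_iff]
  constructor
  · rintro (h | ⟨h1, h2⟩)
    · exact Or.inl h
    · exact Or.inr ⟨h1.symm, h2⟩
  · rintro (h | ⟨h1, h2⟩)
    · exact Or.inl h
    · exact Or.inr ⟨h1.symm, h2⟩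

/-- The running max over `ps` starting from `some b` is a maximum of `b :: ps`. -/
theorem pvFold_max (ps : List (String × String)) (b : String × String) :
    ∃ m, ps.foldl pvUpd (some b) = some m ∧ (m = b ∨ m ∈ ps) ∧
      toLex b ≤ toLex m ∧ ∀ y ∈ ps, toLex y ≤ toLex m := by
  induction ps generalizing b with
  | nil => exact ⟨b, rfl, Or.inl rfl, le_refl _, by simp⟩
  | cons p t ih =>
    simp only [List.foldl_cons, pvUpd]
    by_cases h : b.1 < p.1 ∨ (p.1 = b.1 ∧ b.2 < p.2)
    · rw [if_pos h]
      obtain ⟨m, hm, hmem, hle, hall⟩ := ih p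
      have hbp : toLex b < toLex p := (pvUpd_lt_iff b p).mp h
      refine ⟨m, hm, ?_, le_of_lt (lt_of_lt_of_le hbp hle), ?_⟩
      · rcases hmem with h' | h'
        · exact Or.inr (by simp [h'])
        · exact Or.inr (List.mem_cons_of_mem _ h')
      · intro y hy
        rcases List.mem_cons.mp hy with rfl | hy'
        · exact hle
        · exact hall y hy'
    · rw [if_neg h]
      obtain ⟨m, hm, hmem, hle, hall⟩ := ih b
      have hpb : toLex p ≤ toLex b := by
        by_contra hc
        exact h ((pvUpd_lt_iff b p).mpr (lt_of_not_ge hc))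
      refine ⟨m, hm, ?_, hle, ?_⟩
      · rcases hmem with h' | h'
        · exact Or.inl h'
        · exact Or.inr (List.mem_cons_of_mem _ h')
      · intro y hy
        rcases List.mem_cons.mp hy with rfl | hy'
        · exact le_trans hpb hle
        · exact hall y hy'

/-- The last element of the stably sorted list is a maximum of `ps`. -/
theorem pvSorted_last_max (ps : List (String × String)) (hne : ps ≠ []) :
    ∃ m, (PySem.List.sorted ps (fun p => (toLex p : String ×ₗ String)) false).getLast? = some m ∧
      m ∈ ps ∧ ∀ y ∈ ps, toLex y ≤ toLex m := by
  set l := PySem.List.sorted ps (fun p => (toLex p : String ×ₗ String)) false with hl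
  have hlen : l.length = ps.length := PySem.List.length_sorted ps _ false
  have hlne : l ≠ [] := by
    intro h
    apply hne
    have := hlen
    rw [h] at this
    exact List.eq_nil_of_length_eq_zero this.symm
  have hpos : 0 < l.length := List.length_pos_iff.mpr hlne
  refine ⟨l[l.length - 1], ?_, ?_, ?_⟩
  · rw [List.getLast?_eq_getElem?, List.getElem?_eq_getElem (by omega)]
  · exact (PySem.List.mem_sorted ps _ false _).mp (List.getElem_mem _)
  · intro y hy
    have hy' : y ∈ l := (PySem.List.mem_sorted ps _ false y).mpr hy
    obtain ⟨i, hi, rfl⟩ := List.getElem_of_mem hy'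
    have hpw := PySem.List.sorted_pairwise ps (fun p => (toLex p : String ×ₗ String))
    rw [← hl, List.pairwise_iff_getElem] at hpw
    by_cases hcase : i = l.length - 1
    · subst hcase; exact le_refl _
    · exact hpw i (l.length - 1) hi (by omega) (by omega)

/-- Antisymmetry: two maxima of the same list are equal. -/
theorem pvMax_unique {ps : List (String × String)} {m m' : String × String}
    (hm : m ∈ ps) (hm' : m' ∈ ps)
    (ha : ∀ y ∈ ps, toLex y ≤ toLex m) (ha' : ∀ y ∈ ps, toLex y ≤ toLex m') :
    m = m' := by
  have h1 : toLex m ≤ toLex m' := ha' m hm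
  have h2 : toLex m' ≤ toLex m := ha m' hm'
  exact toLex.injective (le_antisymm h1 h2)

-- ===== VERDICT (by name: the statement is the Claim_ definition above) =====
theorem as_sorted_cursor_spec : Claim_equal_as_sorted_cursor := by
  intro rows _
  unfold Spec_as_sorted_cursor as_sorted_cursor as_sorted_cursor_alt
  rw [pvA_fold_eq, pvB_fold_eq]
  simp only [List.nil_append]
  cases hps : rows.filterMap pvExtract with
  | nil => simp
  | cons p t =>
    rw [if_neg (by simp)]
    rw [PySem.List.pyGet?_neg_one]
    obtain ⟨m, hlast, hmem, hall⟩ := pvSorted_last_max (p :: t) (by simp)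
    obtain ⟨m', hfold, hmem', hble, hall'⟩ := pvFold_max t p
    have hmem'' : m' ∈ p :: t := by
      rcases hmem' with h | h
      · simp [h]
      · exact List.mem_cons_of_mem _ h
    have hall'' : ∀ y ∈ p :: t, toLex y ≤ toLex m' := by
      intro y hy
      rcases List.mem_cons.mp hy with rfl | hy'
      · exact hble
      · exact hall' y hy'
    have : m = m' := pvMax_unique hmem hmem'' hall hall''
    subst this
    rw [hlast]
    simp only [List.foldl_cons]
    have hstart : pvUpd none p = some p := rfl
    rw [hstart, hfold]
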